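-- pv_equiv track=rewrite | github.com/joshanashakya/dissertation | workspace/dataset/java-python/GeeksForGeeks/1396/A/2.py | xorEqualsOrCount
-- ===== SOURCE A (Python) =====
-- def xorEqualsOrCount(N) :
--
--     # variable to store
--     # count of unset bits
--     count = 0
--
--     while(N > 0) :
--
--         bit = N % 2
--
--         if bit == 0 :
--             count += 1
--
--         N //= 2
--
--     return int(pow(2, count))
-- ===== SOURCE B (Python) =====
-- def xorEqualsOrCount(N):
--     # closed-form: zero bits = bit width - set bits; 2^zeros = 1 << zeros
--     if N <= 0:
--         return 1  # no binary digits to scan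
--     zeros = N.bit_length() - bin(N).count('1')
--     return 1 << zeros
-- ===== Notes on version B (the rewrite author's own statement) =====
-- stated objective: simpler
-- what changed: Replaces A's digit-by-digit halving loop with a closed form: zero bits = N.bit_length() - popcount(N), returned as 1 << zeros.
import Mathlib
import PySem

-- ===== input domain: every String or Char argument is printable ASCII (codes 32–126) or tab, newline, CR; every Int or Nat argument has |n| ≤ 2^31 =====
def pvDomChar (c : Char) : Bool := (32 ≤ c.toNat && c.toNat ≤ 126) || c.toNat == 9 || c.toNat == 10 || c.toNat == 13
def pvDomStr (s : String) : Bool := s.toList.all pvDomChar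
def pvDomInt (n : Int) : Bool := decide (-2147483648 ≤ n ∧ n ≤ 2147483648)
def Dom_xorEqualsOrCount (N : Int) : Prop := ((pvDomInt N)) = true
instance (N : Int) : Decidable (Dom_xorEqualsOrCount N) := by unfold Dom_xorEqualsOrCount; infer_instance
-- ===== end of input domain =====

-- B replaces A's digit-by-digit halving loop with the closed form
-- zeros = bit_length - popcount, returned as 1 << zeros (objective: simpler).

-- ===== PORT A =====
-- the while-loop of A: state (N, count); count stays ≥ 0, int(pow(2, count)) = 2 ^ count
def xorEqualsOrCountLoop (N : Int) (count : Int) : Int :=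
  if _h : 0 < N then
    let bit := PySem.Int.mod N 2
    let count' := if bit == 0 then count + 1 else count
    xorEqualsOrCountLoop (PySem.Int.floordiv N 2) count'
  else
    2 ^ count.toNat
termination_by N.toNat
decreasing_by
  rw [PySem.Int.floordiv_eq_ediv_of_pos (by omega)]
  omega

def xorEqualsOrCount (N : Int) : Int :=
  xorEqualsOrCountLoop N 0

-- ===== PORT B =====
-- bin(N).count('1') for N > 0 (the only place B evaluates it) is exactly PySem.Int.bitCount
def xorEqualsOrCount_alt (N : Int) : Int :=
  if N ≤ 0 then 1
  else
    let zeros : Int := (PySem.Int.bitLength N : Int) - (PySem.Int.bitCount N : Int)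
    (1 : Int) <<< zeros.toNat

-- ===== PRECONDITION & SPEC =====
def Spec_xorEqualsOrCount (N : Int) (out : Int) : Prop := out = xorEqualsOrCount_alt N
instance (N : Int) (out : Int) : Decidable (Spec_xorEqualsOrCount N out) := by unfold Spec_xorEqualsOrCount; infer_instance

-- ===== CLAIM (what is proved, stated in full; the proofs are below) =====
def Claim_equal_xorEqualsOrCount : Prop := ∀ (N : Int), Dom_xorEqualsOrCount N → Spec_xorEqualsOrCount N (xorEqualsOrCount N)

-- ===== LEMMAS AND PROOFS =====

lemma loop_eq (n : Nat) : ∀ c : Int, 0 ≤ c →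
    xorEqualsOrCountLoop (n : Int) c
      = 2 ^ (c.toNat + (PySem.Int.bitLength (n : Int) - PySem.Int.bitCount (n : Int))) := by
  induction n using Nat.strong_induction_on with
  | _ n ih =>
    intro c hc
    rw [xorEqualsOrCountLoop]
    by_cases hn : 0 < (n : Int)
    · have hn' : 0 < n := by exact_mod_cast hn
      simp only [hn, dif_pos]
      rw [show PySem.Int.mod (n : Int) 2 = ((n % 2 : Nat) : Int) from by
            exact_mod_cast PySem.Int.mod_natCast n 2,
          show PySem.Int.floordiv (n : Int) 2 = ((n / 2 : Nat) : Int) from by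
            exact_mod_cast PySem.Int.floordiv_natCast n 2]
      have hlt : n / 2 < n := Nat.div_lt_self hn' (by norm_num)
      have hbl := PySem.Int.bitLength_natCast hn'
      have hbc := PySem.Int.bitCount_natCast hn'
      have hle := PySem.Int.bitCount_le_bitLength ((n / 2 : Nat) : Int)
      by_cases hm : n % 2 = 0
      · have := ih (n / 2) hlt (c + 1) (by omega)
        simp only [hm, Nat.cast_zero, beq_self_eq_true, if_true] at *
        rw [this]
        congr 1
        omega
      · have hm1 : n % 2 = 1 := Nat.mod_two_eq_zero_or_one n |>.resolve_left hm
        have := ih (n / 2) hlt c hc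
        simp only [hm1, Nat.cast_one, show ((1 : Int) == 0) = false from rfl,
          Bool.false_eq_true, if_false]
        rw [this]
        congr 1
        omega
    · simp only [hn, dif_neg, not_false_iff]
      have hz : n = 0 := by omega
      subst hz
      simp [PySem.Int.bitLength_zero, PySem.Int.bitCount_zero]

-- ===== VERDICT (by name: the statement is the Claim_ definition above) =====
theorem xorEqualsOrCount_spec : Claim_equal_xorEqualsOrCount := by
  intro N _hd
  unfold Spec_xorEqualsOrCount xorEqualsOrCount xorEqualsOrCount_alt
  by_cases hN : N ≤ 0
  · simp only [hN, if_pos]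
    rw [xorEqualsOrCountLoop]
    simp only [show ¬ 0 < N by omega, dif_neg, not_false_iff]
    norm_num
  · have hpos : 0 < N := by omega
    simp only [hN, if_neg, not_false_iff]
    have hrep : ((N.toNat : Nat) : Int) = N := by omega
    have := loop_eq N.toNat 0 le_rfl
    rw [hrep] at this
    rw [this]
    have hle := PySem.Int.bitCount_le_bitLength N
    rw [Int.shiftLeft_eq]
    simp only [one_mul, Int.toNat_zero, Nat.zero_add]
    congr 1
    omega
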